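-- pv_equiv track=rewrite | github.com/FranRovi/Algorithms | Leet_Code/Medium/findTheScoreDifferenceInAGame.py | scoreDifference
-- ===== SOURCE A (Python) =====
-- def scoreDifference(nums):
--     player1Score = 0
--     player2Score = 0
--     activePlayer = 0
--     numGame = 0
--     for i in range(len(nums)):
--         numGame += 1
--         if numGame % 6 == 0:
--             if activePlayer == 0:
--                 activePlayer = 1
--             else:
--                 activePlayer = 0
--         if nums[i] % 2 != 0:
--             if activePlayer == 0:
--                 activePlayer = 1
--             else:
--                 activePlayer = 0
--         if activePlayer == 0:
--             player1Score += nums[i]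
--         else:
--             player2Score += nums[i]
--     return player1Score - player2Score
-- ===== SOURCE B (Python) =====
-- def scoreDifference(nums):
--     # Stage 1: prefix table of odd-counts (odds[j] = number of odd values among nums[:j]).
--     odds = [0]
--     for x in nums:
--         odds.append(odds[-1] + (x % 2 != 0))
--     # Stage 2: total of all scores.
--     total = sum(nums)
--     # Stage 3: player 2's total, read off the precomputed table; answer = total - 2*p2.
--     p2 = sum(x for i, x in enumerate(nums)
--              if ((i + 1) // 6 + odds[i + 1]) % 2 == 1)
--     return total - 2 * p2
-- ===== Notes on version B (the rewrite author's own statement) =====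
-- stated objective: alternative
-- what changed: Replaces A's stateful single pass (double-toggle activePlayer plus two running scores) with three staged passes: a precomputed prefix table of odd-counts, sum(nums), and player 2's share computed from the table via the closed-form parity ((i+1)//6 + odds[i+1]) % 2, returning total - 2*p2.
import Mathlib
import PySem

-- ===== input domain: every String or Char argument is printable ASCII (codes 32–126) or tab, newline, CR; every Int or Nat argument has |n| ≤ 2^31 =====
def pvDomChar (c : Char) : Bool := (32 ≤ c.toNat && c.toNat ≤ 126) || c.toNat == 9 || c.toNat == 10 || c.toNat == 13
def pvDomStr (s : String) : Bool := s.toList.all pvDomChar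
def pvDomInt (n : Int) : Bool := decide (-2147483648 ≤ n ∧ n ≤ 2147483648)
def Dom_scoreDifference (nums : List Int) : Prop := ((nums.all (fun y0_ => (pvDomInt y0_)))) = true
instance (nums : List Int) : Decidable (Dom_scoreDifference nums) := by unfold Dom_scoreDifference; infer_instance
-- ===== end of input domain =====

-- B replaces A's stateful single pass (double-toggle activePlayer, two score accumulators)
-- with three staged passes: a precomputed prefix table of odd-counts, the total sum, and
-- player 2's share read off the table; answer = total - 2*p2 (alternative decomposition).


-- ===== PORT A =====
-- state: (player1Score, player2Score, activePlayer, numGame)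
def scoreDifferenceStepA (st : Int × Int × Int × Int) (x : Int) : Int × Int × Int × Int :=
  let p1 := st.1; let p2 := st.2.1; let ap := st.2.2.1; let ng := st.2.2.2
  let ng := ng + 1
  let ap := if PySem.Int.mod ng 6 = 0 then (if ap = 0 then 1 else 0) else ap
  let ap := if PySem.Int.mod x 2 ≠ 0 then (if ap = 0 then 1 else 0) else ap
  if ap = 0 then (p1 + x, p2, ap, ng) else (p1, p2 + x, ap, ng)

def scoreDifference (nums : List Int) : Int :=
  let st := nums.foldl scoreDifferenceStepA (0, 0, 0, 0)
  st.1 - st.2.1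

-- ===== PORT B =====
-- odds.append(odds[-1] + (x % 2 != 0)); odds[-1] always exists (the list starts as [0]),
-- so the .getD 0 totalisation is never exercised
def scoreDifferenceStepB (acc : List Int) (x : Int) : List Int :=
  acc ++ [(PySem.List.pyGet? acc (-1)).getD 0 + (if PySem.Int.mod x 2 ≠ 0 then 1 else 0)]

-- the prefix table odds (Stage 1 of Source B)
def scoreDifferenceOdds (nums : List Int) : List Int :=
  nums.foldl scoreDifferenceStepB [0]

-- Stages 2 and 3: total = sum(nums); p2 = sum over enumerate with lookups odds[i+1]
-- (always in range, so the .getD 0 totalisation is never exercised); return total - 2*p2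
def scoreDifference_alt (nums : List Int) : Int :=
  let odds := scoreDifferenceOdds nums
  let total := nums.sum
  let p2 := (PySem.List.enumerate nums 0).foldl
    (fun s p =>
      if PySem.Int.mod (PySem.Int.floordiv (p.1 + 1) 6 + (PySem.List.pyGet? odds (p.1 + 1)).getD 0) 2 = 1
      then s + p.2 else s) 0
  total - 2 * p2

-- ===== PRECONDITION & SPEC =====
def Spec_scoreDifference (nums : List Int) (out : Int) : Prop := out = scoreDifference_alt nums
instance (nums : List Int) (out : Int) : Decidable (Spec_scoreDifference nums out) := by unfold Spec_scoreDifference; infer_instance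

-- ===== CLAIM (what is proved, stated in full; the proofs are below) =====
def Claim_equal_scoreDifference : Prop := ∀ (nums : List Int), Dom_scoreDifference nums → Spec_scoreDifference nums (scoreDifference nums)

-- ===== LEMMAS AND PROOFS =====

theorem pymod2 (a : Int) : PySem.Int.mod a 2 = a % 2 :=
  PySem.Int.mod_eq_emod_of_pos (by norm_num)
theorem pymod6 (a : Int) : PySem.Int.mod a 6 = a % 6 :=
  PySem.Int.mod_eq_emod_of_pos (by norm_num)
theorem pydiv6 (a : Int) : PySem.Int.floordiv a 6 = a / 6 :=
  PySem.Int.floordiv_eq_ediv_of_pos (by norm_num)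

-- odd-indicator and odd-count
def sdDelta (x : Int) : Int := if PySem.Int.mod x 2 ≠ 0 then 1 else 0
def sdOc (l : List Int) : Int := (l.map sdDelta).sum

-- reference: signed sum with derived parity (o = odds so far, g = games so far)
def sdF : List Int → Int → Int → Int
  | [], _, _ => 0
  | x :: t, o, g =>
    let o' := o + sdDelta x
    (if PySem.Int.mod (PySem.Int.floordiv (g + 1) 6 + o') 2 = 0 then x else -x) + sdF t o' (g + 1)

-- reference: player 2's share
def sdP2 : List Int → Int → Int → Int
  | [], _, _ => 0
  | x :: t, o, g =>
    let o' := o + sdDelta x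
    (if PySem.Int.mod (PySem.Int.floordiv (g + 1) 6 + o') 2 = 1 then x else 0) + sdP2 t o' (g + 1)

-- reference: tail of the prefix table starting from running count v
def sdPref : List Int → Int → List Int
  | [], _ => []
  | x :: t, v => (v + sdDelta x) :: sdPref t (v + sdDelta x)

theorem foldA_eq_F : ∀ (l : List Int) (p1 p2 ap ng o : Int),
    0 ≤ ng → ap = (ng / 6 + o) % 2 →
    (l.foldl scoreDifferenceStepA (p1, p2, ap, ng)).1
      - (l.foldl scoreDifferenceStepA (p1, p2, ap, ng)).2.1
      = p1 - p2 + sdF l o ng := by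
  intro l
  induction l with
  | nil => intro p1 p2 ap ng o hng hap; simp [sdF]
  | cons x t ih =>
    intro p1 p2 ap ng o hng hap
    simp only [List.foldl_cons, scoreDifferenceStepA, sdF, sdDelta, pymod2, pymod6, pydiv6]
    subst hap
    by_cases h6 : (ng + 1) % 6 = 0 <;> by_cases hx : x % 2 = 0 <;>
        by_cases hp : (ng / 6 + o) % 2 = 0 <;>
      norm_num [h6, hx, hp] <;>
      split_ifs <;>
      first
        | (exfalso; omega)
        | (rw [ih _ _ _ _ o (by omega) (by omega)]; ring)
        | (rw [ih _ _ _ _ (o + 1) (by omega) (by omega)]; ring)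

theorem sdF_eq_sum_sub_two_p2 : ∀ (l : List Int) (o g : Int),
    sdF l o g = l.sum - 2 * sdP2 l o g := by
  intro l
  induction l with
  | nil => intro o g; simp [sdF, sdP2]
  | cons x t ih =>
    intro o g
    simp only [sdF, sdP2, List.sum_cons, pymod2]
    have hm := Int.emod_two_eq (PySem.Int.floordiv (g + 1) 6 + (o + sdDelta x))
    rcases hm with h | h
    · rw [if_pos h, if_neg (by omega), ih]; ring
    · rw [if_neg (by omega), if_pos h, ih]; ring

-- the foldl building the prefix table equals acc ++ sdPref
theorem foldB_pref : ∀ (l acc : List Int) (v : Int), acc.getLast? = some v →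
    l.foldl scoreDifferenceStepB acc = acc ++ sdPref l v := by
  intro l
  induction l with
  | nil => intro acc v _; simp [sdPref]
  | cons x t ih =>
    intro acc v hv
    have hd : (if PySem.Int.mod x 2 ≠ 0 then (1 : Int) else 0) = sdDelta x := rfl
    simp only [List.foldl_cons, scoreDifferenceStepB, PySem.List.pyGet?_neg_one, hv,
      Option.getD_some, sdPref]
    rw [hd, ih (acc ++ [v + sdDelta x]) (v + sdDelta x) (by simp), List.append_assoc]
    simp

theorem sdPref_get : ∀ (l : List Int) (v : Int) (j : Nat), j < l.length →
    (sdPref l v)[j]? = some (v + sdOc (l.take (j + 1))) := by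
  intro l
  induction l with
  | nil => intro v j hj; simp at hj
  | cons x t ih =>
    intro v j hj
    cases j with
    | zero => simp [sdPref, sdOc]
    | succ j =>
      have hj' : j < t.length := by simpa using hj
      simp only [sdPref, List.getElem?_cons_succ, ih (v + sdDelta x) j hj',
        List.take_succ_cons, sdOc, List.map_cons, List.sum_cons]
      congr 1
      ring

-- the enumerate fold equals sdP2, given a table whose entries are running odd-counts
theorem foldEnum_eq_P2 : ∀ (l : List Int) (odds : List Int) (k : Int) (s o : Int),
    (∀ j : Nat, j < l.length →
        PySem.List.pyGet? odds (k + (j : Int) + 1) = some (o + sdOc (l.take (j + 1)))) →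
    (PySem.List.enumerate l k).foldl
      (fun s p =>
        if PySem.Int.mod (PySem.Int.floordiv (p.1 + 1) 6 + (PySem.List.pyGet? odds (p.1 + 1)).getD 0) 2 = 1
        then s + p.2 else s) s
      = s + sdP2 l o k := by
  intro l
  induction l with
  | nil => intro odds k s o _; simp [PySem.List.enumerate_nil, sdP2]
  | cons x t ih =>
    intro odds k s o h
    have h0 := h 0 (by simp)
    simp only [Nat.cast_zero, add_zero] at h0
    have hoc : sdOc ((x :: t).take 1) = sdDelta x := by simp [sdOc]
    rw [hoc] at h0
    rw [PySem.List.enumerate_cons, List.foldl_cons]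
    simp only [h0, Option.getD_some]
    rw [ih odds (k + 1) _ (o + sdDelta x) ?_]
    · simp only [sdP2]
      split_ifs <;> ring
    · intro j hj
      have h2 := h (j + 1) (by simpa using Nat.succ_lt_succ hj)
      have hidx : k + 1 + (j : Int) + 1 = k + ((j + 1 : Nat) : Int) + 1 := by push_cast; ring
      rw [hidx, h2]
      congr 1
      simp [List.take_succ_cons, sdOc]
      ring

-- ===== VERDICT (by name: the statement is the Claim_ definition above) =====
theorem scoreDifference_spec : Claim_equal_scoreDifference := by
  intro nums _
  have hodds : scoreDifferenceOdds nums = 0 :: sdPref nums 0 := by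
    unfold scoreDifferenceOdds
    rw [foldB_pref nums [0] 0 (by simp)]
    simp
  have hB : scoreDifference_alt nums = nums.sum - 2 * sdP2 nums 0 0 := by
    simp only [scoreDifference_alt]
    rw [hodds, foldEnum_eq_P2 nums (0 :: sdPref nums 0) 0 0 0 ?_]
    · ring
    · intro j hj
      have h01 : (0 : Int) + (j : Int) + 1 = ((j : Int) + 1) := by ring
      rw [h01]
      have hc : PySem.List.pyGet? (0 :: sdPref nums 0) ((j : Int) + 1)
          = PySem.List.pyGet? (sdPref nums 0) (j : Int) :=
        PySem.List.pyGet?_cons_succ _ _ j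
      rw [hc, PySem.List.pyGet?_natCast, sdPref_get nums 0 j hj]
  unfold Spec_scoreDifference scoreDifference
  rw [hB, foldA_eq_F nums 0 0 0 0 0 le_rfl (by norm_num), sdF_eq_sum_sub_two_p2]
  ring
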